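-- pv_equiv track=rewrite | github.com/lsk74669/Coding_Test | 프로그래머스/0/181932. 코드 처리하기/코드 처리하기.py | solution
-- ===== SOURCE A (Python) =====
-- def solution(code):
--     ret= ''
--     mode = 0
--     for idx, i in enumerate(code):
--         if i == '1':
--             mode = 1-mode
--         else:
--             if mode == 0:
--                 if idx % 2 == 0:
--                     ret += code[idx]
--             else:
--                 if idx % 2 == 1:
--                     ret += code[idx]
--     if len(ret) == 0:
--         ret = 'EMPTY'
--     return ret
-- ===== SOURCE B (Python) =====
-- def solution(code):
--     # pass 1: running count of '1' characters strictly before each position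
--     ones_before = []
--     cnt = 0
--     for c in code:
--         ones_before.append(cnt)
--         if c == '1':
--             cnt += 1
--     # pass 2: pick characters whose index parity matches the prefix-'1' parity
--     res = ''.join(c for (i, c), o in zip(enumerate(code), ones_before)
--                   if c != '1' and i % 2 == o % 2)
--     return res or 'EMPTY'
-- ===== Notes on version B (the rewrite author's own statement) =====
-- stated objective: alternative
-- what changed: Replaces the sequential mode-toggling accumulator loop by two passes: a precomputed prefix table of '1'-counts plus a join over a comprehension selecting characters whose index parity matches the prefix parity.
import Mathlib
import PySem

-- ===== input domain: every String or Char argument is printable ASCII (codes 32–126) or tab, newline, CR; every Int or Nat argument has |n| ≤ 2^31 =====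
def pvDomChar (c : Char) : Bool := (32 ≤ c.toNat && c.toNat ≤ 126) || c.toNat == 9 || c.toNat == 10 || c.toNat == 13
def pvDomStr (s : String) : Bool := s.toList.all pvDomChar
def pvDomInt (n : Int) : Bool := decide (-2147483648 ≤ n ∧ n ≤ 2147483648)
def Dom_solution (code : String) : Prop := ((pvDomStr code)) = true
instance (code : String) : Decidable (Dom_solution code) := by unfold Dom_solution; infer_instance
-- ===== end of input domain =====

-- B replaces A's sequential mode-toggling accumulator by two passes: a prefix table of
-- '1'-counts, then a filter comparing index parity with prefix parity (alternative, same cost).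

-- ===== PORT A =====
-- A's for-loop over enumerate(code): idx is the running index, mode the toggle, ret the
-- accumulated characters (string built by += , kept as List Char, joined at the end;
-- code[idx] = c since idx is the enumerate index of c).
def solLoopA : List Char → Int → Int → List Char → List Char
  | [], _, _, ret => ret
  | c :: rest, idx, mode, ret =>
    if c == '1' then solLoopA rest (idx + 1) (1 - mode) ret
    else if mode == 0 then
      (if PySem.Int.mod idx 2 == 0 then solLoopA rest (idx + 1) mode (ret ++ [c])
       else solLoopA rest (idx + 1) mode ret)
    else
      (if PySem.Int.mod idx 2 == 1 then solLoopA rest (idx + 1) mode (ret ++ [c])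
       else solLoopA rest (idx + 1) mode ret)

def solution (code : String) : String :=
  let ret := solLoopA code.toList 0 0 []
  if ret.length == 0 then "EMPTY" else String.ofList ret

-- ===== PORT B =====
-- pass 1 of Source B: ones_before, the running count of '1's strictly before each position
def onesBeforeTab : List Char → Int → List Int
  | [], _ => []
  | c :: rest, cnt => cnt :: onesBeforeTab rest (if c == '1' then cnt + 1 else cnt)

def solution_alt (code : String) : String :=
  let cs := code.toList
  let ones_before := onesBeforeTab cs 0
  -- pass 2 of Source B: ''.join(c for (i, c), o in zip(enumerate(code), ones_before) if …)
  let res := (((PySem.List.enumerate cs 0).zip ones_before).filter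
      (fun p => p.1.2 != '1' && PySem.Int.mod p.1.1 2 == PySem.Int.mod p.2 2)).map (·.1.2)
  if res = [] then "EMPTY" else String.ofList res

-- ===== PRECONDITION & SPEC =====
def Spec_solution (code : String) (out : String) : Prop := out = solution_alt code
instance (code : String) (out : String) : Decidable (Spec_solution code out) := by unfold Spec_solution; infer_instance

-- ===== CLAIM (what is proved, stated in full; the proofs are below) =====
def Claim_equal_solution : Prop := ∀ (code : String), Dom_solution code → Spec_solution code (solution code)

-- ===== LEMMAS AND PROOFS =====

-- the selected characters of B's pass 2, generalized over the start index and prefix count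
lemma loop_eq_sel : ∀ (cs : List Char) (s cnt : Nat) (ret : List Char),
    solLoopA cs (s : Int) ((cnt % 2 : Nat) : Int) ret
      = ret ++ (((PySem.List.enumerate cs (s : Int)).zip (onesBeforeTab cs (cnt : Nat))).filter
          (fun p => p.1.2 != '1' && PySem.Int.mod p.1.1 2 == PySem.Int.mod p.2 2)).map (·.1.2) := by
  intro cs
  induction cs with
  | nil => intro s cnt ret; simp [solLoopA, onesBeforeTab, PySem.List.enumerate_nil]
  | cons c rest ih =>
    intro s cnt ret
    rw [PySem.List.enumerate_cons]
    by_cases hc : c = '1'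
    · subst hc
      have hmode : (1 : Int) - ((cnt % 2 : Nat) : Int) = (((cnt + 1) % 2 : Nat) : Int) := by
        omega
      have hs1 : ((s : Int) + 1) = ((s + 1 : Nat) : Int) := by push_cast; ring
      have hc1 : ((cnt : Nat) : Int) + 1 = ((cnt + 1 : Nat) : Int) := by push_cast; ring
      simp only [solLoopA, onesBeforeTab, List.zip_cons_cons, List.filter_cons,
        beq_self_eq_true, bne_self_eq_false, Bool.false_and, Bool.false_eq_true,
        if_false, if_true, hmode, hs1, hc1]
      exact ih (s + 1) (cnt + 1) ret
    · have hbeq : (c == '1') = false := by simp [hc]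
      have hnext : (if c == '1' then ((cnt : Nat) : Int) + 1 else ((cnt : Nat) : Int))
          = ((cnt : Nat) : Int) := by simp [hbeq]
      have hs1 : ((s : Int) + 1) = ((s + 1 : Nat) : Int) := by push_cast; ring
      have hmods : PySem.Int.mod (s : Int) 2 = ((s % 2 : Nat) : Int) := by
        exact_mod_cast PySem.Int.mod_natCast s 2
      have hmodc : PySem.Int.mod ((cnt : Nat) : Int) 2 = ((cnt % 2 : Nat) : Int) := by
        exact_mod_cast PySem.Int.mod_natCast cnt 2
      simp only [solLoopA, onesBeforeTab, List.zip_cons_cons, List.filter_cons, hbeq,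
        if_false, Bool.false_eq_true, hs1]
      by_cases hpar : s % 2 = cnt % 2
      · -- parities agree: both sides keep c
        have hcondB : ((c != '1') && (PySem.Int.mod (s : Int) 2 == PySem.Int.mod ((cnt : Nat) : Int) 2)) = true := by
          simp; exact ⟨hc, by omega⟩
        rw [hcondB]
        by_cases hm : cnt % 2 = 0
        · have hA0 : (((cnt % 2 : Nat) : Int) == 0) = true := by simp [hm]
          have hsA : (PySem.Int.mod (s : Int) 2 == 0) = true := by
            simp; omega
          simp only [hA0, if_true, hsA, List.map_cons]
          rw [ih (s + 1) cnt (ret ++ [c])]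
          simp
        · have hm1 : cnt % 2 = 1 := by omega
          have hA0 : (((cnt % 2 : Nat) : Int) == 0) = false := by simp [hm1]
          have hsA : (PySem.Int.mod (s : Int) 2 == 1) = true := by
            simp; omega
          simp only [hA0, Bool.false_eq_true, if_false, hsA, if_true, List.map_cons]
          rw [ih (s + 1) cnt (ret ++ [c])]
          simp
      · -- parities differ: both sides skip c
        have hcondB : ((c != '1') && (PySem.Int.mod (s : Int) 2 == PySem.Int.mod ((cnt : Nat) : Int) 2)) = false := by
          simp; intro _; omega
        rw [hcondB]
        by_cases hm : cnt % 2 = 0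
        · have hA0 : (((cnt % 2 : Nat) : Int) == 0) = true := by simp [hm]
          have hsA : (PySem.Int.mod (s : Int) 2 == 0) = false := by
            simp; omega
          simp only [hA0, if_true, hsA, Bool.false_eq_true, if_false]
          exact ih (s + 1) cnt ret
        · have hm1 : cnt % 2 = 1 := by omega
          have hA0 : (((cnt % 2 : Nat) : Int) == 0) = false := by simp [hm1]
          have hsA : (PySem.Int.mod (s : Int) 2 == 1) = false := by
            simp; omega
          simp only [hA0, Bool.false_eq_true, if_false, hsA]
          exact ih (s + 1) cnt ret

lemma solLoop_eq (cs : List Char) :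
    solLoopA cs 0 0 []
      = (((PySem.List.enumerate cs 0).zip (onesBeforeTab cs 0)).filter
          (fun p => p.1.2 != '1' && PySem.Int.mod p.1.1 2 == PySem.Int.mod p.2 2)).map (·.1.2) := by
  have h := loop_eq_sel cs 0 0 []
  simpa using h

-- A tests len(ret) == 0, B tests res == ''; the two guards agree on any list
lemma emptyGuard_eq (l : List Char) :
    (if l.length == 0 then "EMPTY" else String.ofList l)
      = (if l = [] then "EMPTY" else String.ofList l) := by
  cases l <;> simp

-- ===== VERDICT (by name: the statement is the Claim_ definition above) =====
theorem solution_spec : Claim_equal_solution := by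
  intro code _
  simp only [Spec_solution, solution, solution_alt, solLoop_eq]
  exact emptyGuard_eq _
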